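-- pv_equiv track=rewrite | github.com/maxkashyap41/pythonDSA | Array/MaxContiguousMemoryDeletion_slidingWindow.py | minMemory
-- ===== SOURCE A (Python) =====
-- def minMemory(arr, n, k) -> int:
--     currSum = 0
--     maxSum = float('-inf')
--     for i in range(k):
--         currSum += arr[i]
--
--     maxSum = currSum
--     for i in range(k, n):
--         currSum = currSum + (arr[i] - arr[i-k])
--         if maxSum < currSum:
--             maxSum = currSum
--
--     result = sum(arr) - maxSum
--     return result
-- ===== SOURCE B (Python) =====
-- def minMemory(arr, n, k) -> int:
--     P = [0]
--     for x in arr: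
--         P.append(P[-1] + x)
--     best = P[k] - P[0]
--     for j in range(1, n - k + 1):
--         s = P[j + k] - P[j]
--         if best < s:
--             best = s
--     return P[len(arr)] - best
-- ===== Notes on version B (the rewrite author's own statement) =====
-- stated objective: alternative
-- what changed: B builds a prefix-sum table once and reads each k-window sum as P[j+k]-P[j], initializing the maximum with the first window and scanning the remaining window starts, instead of A's incremental sliding-window update of a running sum.
-- outside the precondition, e.g. on minMemory([1, 2, 3], 2, -1): A returns 4, B returns 0; on minMemory([1, 2, 3], 1, -2): A returns 4, B returns 1
import Mathlib
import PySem

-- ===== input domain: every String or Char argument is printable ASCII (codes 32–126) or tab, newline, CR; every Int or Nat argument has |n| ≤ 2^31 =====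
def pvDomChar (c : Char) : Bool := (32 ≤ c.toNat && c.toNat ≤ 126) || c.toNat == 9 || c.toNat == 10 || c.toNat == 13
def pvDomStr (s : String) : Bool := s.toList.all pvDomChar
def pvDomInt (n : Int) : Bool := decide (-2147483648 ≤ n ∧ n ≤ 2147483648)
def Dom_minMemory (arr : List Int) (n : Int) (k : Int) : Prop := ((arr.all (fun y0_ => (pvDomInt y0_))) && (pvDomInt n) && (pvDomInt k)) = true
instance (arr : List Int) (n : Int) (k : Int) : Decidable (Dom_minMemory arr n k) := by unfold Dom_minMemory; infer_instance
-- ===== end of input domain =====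

-- B: prefix-sum table + one scan over window starts, instead of A's incremental sliding-window sum.

-- ===== PORT A =====
def minMemory (arr : List Int) (n : Int) (k : Int) : Int :=
  let currSum : Int :=
    (PySem.List.pyRange 0 k 1).foldl (fun s i => s + PySem.List.pyGetD arr i 0) 0
  let st : Int × Int :=
    (PySem.List.pyRange k n 1).foldl
      (fun (p : Int × Int) i =>
        let c := p.1 + (PySem.List.pyGetD arr i 0 - PySem.List.pyGetD arr (i - k) 0)
        (c, if p.2 < c then c else p.2))
      (currSum, currSum)
  arr.sum - st.2

-- ===== PORT B =====
def minMemory_alt (arr : List Int) (n : Int) (k : Int) : Int :=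
  let P : List Int := arr.foldl (fun acc x => acc ++ [PySem.List.pyGetD acc (-1) 0 + x]) [0]
  let best : Int := PySem.List.pyGetD P k 0 - PySem.List.pyGetD P 0 0
  let best : Int :=
    (PySem.List.pyRange 1 (n - k + 1) 1).foldl
      (fun (b : Int) j =>
        let s := PySem.List.pyGetD P (j + k) 0 - PySem.List.pyGetD P j 0
        if b < s then s else b)
      best
  PySem.List.pyGetD P (arr.length : Int) 0 - best

-- ===== PRECONDITION & SPEC =====
-- Pre_ is 0 ≤ k ≤ len(arr) and n ≤ len(arr): exactly the inputs where A returns normally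
-- for nonnegative k (otherwise an arr[i] raises IndexError); negative k is excluded, where
-- A's returned value relies on Python's negative-index wraparound and B's differs.
def Pre_minMemory (arr : List Int) (n : Int) (k : Int) : Prop :=
  0 ≤ k ∧ k ≤ (arr.length : Int) ∧ n ≤ (arr.length : Int)
instance (arr : List Int) (n : Int) (k : Int) : Decidable (Pre_minMemory arr n k) := by
  unfold Pre_minMemory; infer_instance
def pvWitness_minMemory : List Int × Int × Int := ([1, 2, 3], 3, 2)
def Spec_minMemory (arr : List Int) (n : Int) (k : Int) (out : Int) : Prop := out = minMemory_alt arr n k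
instance (arr : List Int) (n : Int) (k : Int) (out : Int) : Decidable (Spec_minMemory arr n k out) := by unfold Spec_minMemory; infer_instance

-- ===== CLAIM (what is proved, stated in full; the proofs are below) =====
def Claim_equal_minMemory : Prop := ∀ (arr : List Int) (n : Int) (k : Int), Dom_minMemory arr n k → Pre_minMemory arr n k → Spec_minMemory arr n k (minMemory arr n k)

-- ===== LEMMAS AND PROOFS =====

-- prefix sum of the first j elements
def pvS (arr : List Int) (j : Nat) : Int := (arr.take j).sum
-- sum of the window of length kn starting at j
def pvW (arr : List Int) (kn j : Nat) : Int := pvS arr (j + kn) - pvS arr j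
-- running maximum of the first m+1 windows, in A's/B's update shape
def pvM (arr : List Int) (kn : Nat) : Nat → Int
  | 0 => pvW arr kn 0
  | m + 1 => if pvM arr kn m < pvW arr kn (m + 1) then pvW arr kn (m + 1) else pvM arr kn m

theorem pvS_succ (arr : List Int) (j : Nat) (h : j < arr.length) :
    pvS arr (j + 1) = pvS arr j + arr[j] := by
  simp [pvS, List.sum_take_succ _ _ h]

theorem pv_first_loop (arr : List Int) (kn : Nat) (h : kn ≤ arr.length) :
    (PySem.List.pyRange 0 (kn : Int) 1).foldl (fun s i => s + PySem.List.pyGetD arr i 0) 0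
      = pvS arr kn := by
  induction kn with
  | zero => simp [PySem.List.pyRange_one_eq_nil, pvS]
  | succ m ih =>
    have hm : m < arr.length := h
    rw [show ((m + 1 : Nat) : Int) = (m : Int) + 1 by push_cast; ring,
        PySem.List.pyRange_one_succ_right (by omega), List.foldl_append,
        ih (le_of_lt hm)]
    simp [pvS_succ arr m hm, List.getElem?_eq_getElem hm]

theorem pv_second_loop (arr : List Int) (kn m : Nat) (h : kn + m ≤ arr.length) :
    (PySem.List.pyRange (kn : Int) ((kn : Int) + (m : Int)) 1).foldl
      (fun (p : Int × Int) i =>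
        (p.1 + (PySem.List.pyGetD arr i 0 - PySem.List.pyGetD arr (i - (kn : Int)) 0),
         if p.2 < p.1 + (PySem.List.pyGetD arr i 0 - PySem.List.pyGetD arr (i - (kn : Int)) 0)
         then p.1 + (PySem.List.pyGetD arr i 0 - PySem.List.pyGetD arr (i - (kn : Int)) 0)
         else p.2))
      (pvS arr kn, pvS arr kn)
      = (pvW arr kn m, pvM arr kn m) := by
  induction m with
  | zero => simp [PySem.List.pyRange_one_eq_nil, pvW, pvM, pvS]
  | succ m ih =>
    have h1 : kn + m < arr.length := by omega
    have h2 : m < arr.length := by omega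
    rw [show (kn : Int) + ((m + 1 : Nat) : Int) = ((kn : Int) + (m : Int)) + 1 by push_cast; ring,
        PySem.List.pyRange_one_succ_right (by omega), List.foldl_append, ih (by omega)]
    have e1 : PySem.List.pyGetD arr ((kn : Int) + (m : Int)) 0 = arr[kn + m] := by
      rw [show (kn : Int) + (m : Int) = ((kn + m : Nat) : Int) by push_cast; ring,
          PySem.List.pyGetD_natCast]
      simp [List.getElem?_eq_getElem h1]
    have e2 : PySem.List.pyGetD arr ((kn : Int) + (m : Int) - (kn : Int)) 0 = arr[m] := by
      rw [show (kn : Int) + (m : Int) - (kn : Int) = ((m : Nat) : Int) by ring,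
          PySem.List.pyGetD_natCast]
      simp [List.getElem?_eq_getElem h2]
    have ew : pvW arr kn m + (arr[kn + m] - arr[m]) = pvW arr kn (m + 1) := by
      have hA := pvS_succ arr (kn + m) h1
      have hB := pvS_succ arr m h2
      simp only [pvW]
      rw [show m + 1 + kn = (kn + m) + 1 by ring, show m + kn = kn + m by ring]
      omega
    simp only [List.foldl_cons, List.foldl_nil, e1, e2, ew, pvM]

theorem pv_prefix_list (arr : List Int) :
    arr.foldl (fun acc x => acc ++ [PySem.List.pyGetD acc (-1) 0 + x]) [0]
      = (List.range (arr.length + 1)).map (pvS arr) := by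
  induction arr using List.reverseRecOn with
  | nil => simp [pvS]
  | append_singleton l x ih =>
    rw [List.foldl_append, ih]
    have hne : (List.range (l.length + 1)).map (pvS l) ≠ [] := by simp
    have hlast : PySem.List.pyGetD ((List.range (l.length + 1)).map (pvS l)) (-1) 0
        = pvS l l.length := by
      rw [PySem.List.pyGetD_neg_one _ _ hne]
      rw [List.getLast_eq_getElem]
      simp [pvS]
    rw [List.foldl_cons, List.foldl_nil, hlast]
    have hrange : List.range ((l ++ [x]).length + 1)
        = List.range (l.length + 1) ++ [l.length + 1] := by
      simp [List.range_succ]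
    rw [hrange, List.map_append]
    congr 1
    · apply List.map_congr_left
      intro j hj
      have hj' : j ≤ l.length := by
        have := List.mem_range.mp hj; omega
      simp [pvS, List.take_append_of_le_length hj']
    · simp [pvS, List.take_of_length_le (by simp : (l ++ [x]).length ≤ l.length + 1)]

theorem pv_P_get (arr : List Int) (j : Nat) (hj : j ≤ arr.length) :
    PySem.List.pyGetD ((List.range (arr.length + 1)).map (pvS arr)) (j : Int) 0
      = pvS arr j := by
  simp [List.getD_eq_getElem?_getD, List.getElem?_map, List.getElem?_range (by omega : j < arr.length + 1)]

theorem pv_B_loop (arr : List Int) (kn m : Nat) (h : kn + m ≤ arr.length) :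
    (PySem.List.pyRange 1 ((m : Int) + 1) 1).foldl
      (fun (b : Int) j =>
        if b < PySem.List.pyGetD ((List.range (arr.length + 1)).map (pvS arr)) (j + (kn : Int)) 0
               - PySem.List.pyGetD ((List.range (arr.length + 1)).map (pvS arr)) j 0
        then PySem.List.pyGetD ((List.range (arr.length + 1)).map (pvS arr)) (j + (kn : Int)) 0
             - PySem.List.pyGetD ((List.range (arr.length + 1)).map (pvS arr)) j 0
        else b)
      (pvW arr kn 0)
      = pvM arr kn m := by
  induction m with
  | zero =>
    rw [show ((0 : Nat) : Int) + 1 = 1 by norm_num, PySem.List.pyRange_one_eq_nil (by omega)]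
    simp [pvM]
  | succ m ih =>
    rw [show ((m + 1 : Nat) : Int) + 1 = ((m : Int) + 1) + 1 by push_cast; ring,
        PySem.List.pyRange_one_succ_right (by omega), List.foldl_append, ih (by omega)]
    simp only [List.foldl_cons, List.foldl_nil]
    rw [show (m : Int) + 1 + (kn : Int) = ((m + 1 + kn : Nat) : Int) by push_cast; ring]
    rw [pv_P_get arr (m + 1 + kn) (by omega)]
    rw [show (m : Int) + 1 = ((m + 1 : Nat) : Int) by push_cast; ring,
        pv_P_get arr (m + 1) (by omega)]
    simp only [pvM, pvW]

-- ===== VERDICT (by name: the statement is the Claim_ definition above) =====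
theorem minMemory_spec : Claim_equal_minMemory := by
  intro arr n k _ hpre
  obtain ⟨hk0, hkl, hnl⟩ := hpre
  unfold Spec_minMemory minMemory minMemory_alt
  set kn := k.toNat with hknv
  have hk : k = (kn : Int) := by omega
  have hknl : kn ≤ arr.length := by omega
  rw [hk, pv_prefix_list arr]
  dsimp only
  have g0 := pv_P_get arr 0 (Nat.zero_le _)
  norm_num at g0
  have gk := pv_P_get arr kn hknl
  have glen := pv_P_get arr arr.length (le_refl _)
  rw [pv_first_loop arr kn hknl, gk, g0, glen]
  by_cases hkn : k ≤ n
  · -- at least one full window: n = kn + m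
    set m := (n - k).toNat with hmv
    have hn : n = (kn : Int) + (m : Int) := by omega
    have hlen : kn + m ≤ arr.length := by omega
    rw [hn, pv_second_loop arr kn m hlen,
        show (kn : Int) + (m : Int) - (kn : Int) + 1 = (m : Int) + 1 by ring]
    have hw0 : pvS arr kn - pvS arr 0 = pvW arr kn 0 := by simp [pvW, pvS]
    rw [hw0, pv_B_loop arr kn m hlen]
    simp [pvS]
  · -- n < k: both loops are empty
    rw [PySem.List.pyRange_one_eq_nil (by omega : n ≤ (kn : Int)),
        PySem.List.pyRange_one_eq_nil (by omega : n - (kn : Int) + 1 ≤ 1)]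
    simp [pvS]
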